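-- pv_equiv track=rewrite | github.com/Jovan777/pyCharm_faculty_projects | zadaci1/slicnost.py | broj_pojavljivanja
-- ===== SOURCE A (Python) =====
-- def broj_pojavljivanja(tekst):
--     lista_pojavljivanja=[]
--     for i in range(1,501):
--         cnt = 0
--         for s in range(len(tekst)):
--             if i==tekst[s][0] or i==tekst[s][1]:
--                 cnt+=1
--         if(cnt>0):
--             lista_pojavljivanja.append((str(i),cnt))
--     return lista_pojavljivanja
-- ===== SOURCE B (Python) =====
-- def broj_pojavljivanja(tekst):
--     # One pass: build a frequency table, then emit counts for 1..500 in order.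
--     counts = {}
--     for a, b in tekst:
--         counts[a] = counts.get(a, 0) + 1
--         if b != a:
--             counts[b] = counts.get(b, 0) + 1
--     rezultat = []
--     for i in range(1, 501):
--         c = counts.get(i, 0)
--         if c > 0:
--             rezultat.append((str(i), c))
--     return rezultat
-- ===== Notes on version B (the rewrite author's own statement) =====
-- stated objective: faster
-- what changed: B makes one pass over tekst building a frequency dict (bumping each pair's two values, the second only when distinct) and then emits (str(i), count) for i in 1..500 from the table, instead of A's rescanning the whole list once for each of the 500 values.
import Mathlib
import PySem

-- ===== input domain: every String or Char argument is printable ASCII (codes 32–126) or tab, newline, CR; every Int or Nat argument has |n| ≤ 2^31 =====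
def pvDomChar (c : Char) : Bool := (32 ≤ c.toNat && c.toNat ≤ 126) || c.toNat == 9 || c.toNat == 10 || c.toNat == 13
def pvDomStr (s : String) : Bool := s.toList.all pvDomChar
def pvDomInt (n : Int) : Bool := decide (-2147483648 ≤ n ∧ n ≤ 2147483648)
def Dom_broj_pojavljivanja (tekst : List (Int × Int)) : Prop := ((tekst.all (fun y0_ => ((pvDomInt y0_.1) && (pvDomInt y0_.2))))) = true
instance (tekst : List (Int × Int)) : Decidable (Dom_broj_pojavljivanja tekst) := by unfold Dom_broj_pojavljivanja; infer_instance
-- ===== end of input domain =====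

-- B replaces A's 500 rescans of tekst with a single pass building a frequency dict,
-- then one ordered emission pass over 1..500 (objective: faster).

-- ===== PORT A =====
def broj_pojavljivanja (tekst : List (Int × Int)) : List (String × Int) :=
  (PySem.List.pyRange 1 501 1).foldl (fun lista_pojavljivanja i =>
    let cnt : Int :=
      (PySem.List.pyRange 0 tekst.length 1).foldl (fun cnt s =>
        if i = (PySem.List.pyGetD tekst s (0, 0)).1 ∨ i = (PySem.List.pyGetD tekst s (0, 0)).2
        then cnt + 1 else cnt) 0
    if cnt > 0 then lista_pojavljivanja ++ [(PySem.Int.toStr i, cnt)]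
    else lista_pojavljivanja) []

-- ===== PORT B =====
def pvBump (d : PySem.Dict Int Int) (p : Int × Int) : PySem.Dict Int Int :=
  let d' := d.insert p.1 (d.getD p.1 0 + 1)
  if p.2 ≠ p.1 then d'.insert p.2 (d'.getD p.2 0 + 1) else d'

def broj_pojavljivanja_alt (tekst : List (Int × Int)) : List (String × Int) :=
  let counts : PySem.Dict Int Int := tekst.foldl pvBump PySem.Dict.empty
  (PySem.List.pyRange 1 501 1).foldl (fun rezultat i =>
    let c := counts.getD i 0
    if c > 0 then rezultat ++ [(PySem.Int.toStr i, c)] else rezultat) []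

-- ===== PRECONDITION & SPEC =====
def Spec_broj_pojavljivanja (tekst : List (Int × Int)) (out : List (String × Int)) : Prop := out = broj_pojavljivanja_alt tekst
instance (tekst : List (Int × Int)) (out : List (String × Int)) : Decidable (Spec_broj_pojavljivanja tekst out) := by unfold Spec_broj_pojavljivanja; infer_instance

-- ===== CLAIM (what is proved, stated in full; the proofs are below) =====
def Claim_equal_broj_pojavljivanja : Prop := ∀ (tekst : List (Int × Int)), Dom_broj_pojavljivanja tekst → Spec_broj_pojavljivanja tekst (broj_pojavljivanja tekst)

-- ===== LEMMAS AND PROOFS =====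

-- One bump step changes getD i exactly as A's inner counting step does.
theorem pvBump_getD (d : PySem.Dict Int Int) (p : Int × Int) (i : Int) :
    (pvBump d p).getD i 0 = if i = p.1 ∨ i = p.2 then d.getD i 0 + 1 else d.getD i 0 := by
  unfold pvBump
  by_cases h : p.2 = p.1 <;> simp [h, PySem.Dict.getD_insert] <;> split_ifs <;> simp_all

-- The frequency dict counts i's matches in tekst, folded from any start dict.
theorem pvCounts_getD (tekst : List (Int × Int)) (d : PySem.Dict Int Int) (i : Int) :
    (tekst.foldl pvBump d).getD i 0 =
      tekst.foldl (fun cnt p => if i = p.1 ∨ i = p.2 then cnt + 1 else cnt) (d.getD i 0) := by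
  induction tekst generalizing d with
  | nil => rfl
  | cons p t ih => simp only [List.foldl_cons, ih, pvBump_getD]

set_option maxRecDepth 4000 in
theorem broj_pojavljivanja_eq (tekst : List (Int × Int)) :
    broj_pojavljivanja tekst = broj_pojavljivanja_alt tekst := by
  unfold broj_pojavljivanja broj_pojavljivanja_alt
  apply PySem.List.foldl_congr_mem
  intro acc i _
  rw [PySem.List.foldl_pyRange_zero_pyGetD' tekst (0, 0)
      (fun cnt p => if i = p.1 ∨ i = p.2 then cnt + 1 else cnt) 0,
      pvCounts_getD, PySem.Dict.getD_empty]

-- ===== VERDICT (by name: the statement is the Claim_ definition above) =====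
theorem broj_pojavljivanja_spec : Claim_equal_broj_pojavljivanja := by
  intro tekst _
  exact (broj_pojavljivanja_eq tekst).symm ▸ rfl
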